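-- pv_equiv track=rewrite | github.com/madbailey/fred-nlp-query | src/fred_query/services/transform/relationship.py | choose_relationship_frequency
-- ===== SOURCE A (Python) =====
-- def choose_relationship_frequency(
--     frequencies: list[str],
-- ) -> tuple[str, str, int, str]:
--     normalized = [value.strip().lower() for value in frequencies if value]
--     if any("annual" in value or value == "a" for value in normalized):
--         return "a", "Annual", 1, "years"
--     if any("quarter" in value or value == "q" for value in normalized):
--         return "q", "Quarterly", 4, "quarters"
--     return "m", "Monthly", 12, "months"
-- ===== SOURCE B (Python) =====
-- _TABLE = {
--     1: ("a", "Annual", 1, "years"),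
--     2: ("q", "Quarterly", 4, "quarters"),
--     3: ("m", "Monthly", 12, "months"),
-- }
--
--
-- def choose_relationship_frequency(frequencies):
--     best = 3
--     for raw in frequencies:
--         if not raw:
--             continue
--         value = raw.strip().lower()
--         if "annual" in value or value == "a":
--             best = 1
--         elif ("quarter" in value or value == "q") and best > 2:
--             best = 2
--     return _TABLE[best]
-- ===== Notes on version B (the rewrite author's own statement) =====
-- stated objective: alternative
-- what changed: Replaces the normalized intermediate list and the two whole-list any() scans with a single pass that keeps a running minimum priority rank per value and finishes with one table lookup.
import Mathlib
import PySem

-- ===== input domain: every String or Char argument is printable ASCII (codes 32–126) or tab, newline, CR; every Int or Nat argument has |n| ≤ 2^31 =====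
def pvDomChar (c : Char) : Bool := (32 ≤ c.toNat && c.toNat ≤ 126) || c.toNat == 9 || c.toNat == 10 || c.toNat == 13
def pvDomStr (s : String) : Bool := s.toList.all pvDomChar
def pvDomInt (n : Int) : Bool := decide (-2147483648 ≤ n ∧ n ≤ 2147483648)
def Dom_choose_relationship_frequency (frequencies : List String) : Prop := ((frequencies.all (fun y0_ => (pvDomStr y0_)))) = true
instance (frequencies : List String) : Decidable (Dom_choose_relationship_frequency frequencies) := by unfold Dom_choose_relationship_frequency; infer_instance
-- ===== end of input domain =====

-- Single-pass running-minimum-rank + table lookup instead of a normalized list and two any() scans (alternative decomposition).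


-- ===== PORT A =====
def choose_relationship_frequency (frequencies : List String) : String × String × Int × String :=
  let normalized := (frequencies.filter (fun value => !(value == ""))).map
    (fun value => PySem.Str.lower (PySem.Str.strip value))
  if normalized.any (fun value => PySem.Str.isIn "annual" value || value == "a") then
    ("a", "Annual", 1, "years")
  else if normalized.any (fun value => PySem.Str.isIn "quarter" value || value == "q") then
    ("q", "Quarterly", 4, "quarters")
  else
    ("m", "Monthly", 12, "months")

-- ===== PORT B =====
-- one step of Source B's loop: update the running best rank with one raw value
def crfRank (best : Nat) (raw : String) : Nat :=
  if raw == "" then best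
  else
    let value := PySem.Str.lower (PySem.Str.strip raw)
    if PySem.Str.isIn "annual" value || value == "a" then 1
    else if (PySem.Str.isIn "quarter" value || value == "q") && decide (best > 2) then 2
    else best

-- Source B's _TABLE
def crfTable (rank : Nat) : String × String × Int × String :=
  if rank = 1 then ("a", "Annual", 1, "years")
  else if rank = 2 then ("q", "Quarterly", 4, "quarters")
  else ("m", "Monthly", 12, "months")

def choose_relationship_frequency_alt (frequencies : List String) : String × String × Int × String :=
  crfTable (frequencies.foldl crfRank 3)

-- ===== PRECONDITION & SPEC =====
def Spec_choose_relationship_frequency (frequencies : List String) (out : String × String × Int × String) : Prop := out = choose_relationship_frequency_alt frequencies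
instance (frequencies : List String) (out : String × String × Int × String) : Decidable (Spec_choose_relationship_frequency frequencies out) := by unfold Spec_choose_relationship_frequency; infer_instance

-- ===== CLAIM (what is proved, stated in full; the proofs are below) =====
def Claim_equal_choose_relationship_frequency : Prop := ∀ (frequencies : List String), Dom_choose_relationship_frequency frequencies → Spec_choose_relationship_frequency frequencies (choose_relationship_frequency frequencies)

-- ===== LEMMAS AND PROOFS =====

-- truthy value whose normalization matches the annual (resp. quarter) test
def crfAnn (v : String) : Bool :=
  !(v == "") && (PySem.Str.isIn "annual" (PySem.Str.lower (PySem.Str.strip v))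
    || PySem.Str.lower (PySem.Str.strip v) == "a")

def crfQ (v : String) : Bool :=
  !(v == "") && (PySem.Str.isIn "quarter" (PySem.Str.lower (PySem.Str.strip v))
    || PySem.Str.lower (PySem.Str.strip v) == "q")

lemma crfRank_eq (b : Nat) (h : String) :
    crfRank b h = if crfAnn h then 1 else if crfQ h && decide (b > 2) then 2 else b := by
  by_cases he : (h == "") = true
  · simp [crfRank, crfAnn, crfQ, he]
  · simp [crfRank, crfAnn, crfQ, he]

lemma crf_foldl_one (fs : List String) : fs.foldl crfRank 1 = 1 := by
  induction fs with
  | nil => rfl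
  | cons h t ih => rw [List.foldl_cons, crfRank_eq]; simp [ih]

lemma crf_foldl_two (fs : List String) :
    fs.foldl crfRank 2 = if fs.any crfAnn then 1 else 2 := by
  induction fs with
  | nil => rfl
  | cons h t ih =>
      rw [List.foldl_cons, crfRank_eq]
      cases hA : crfAnn h
      · simp [hA, ih, List.any_cons]
      · simp [hA, crf_foldl_one, List.any_cons]

lemma crf_foldl_three (fs : List String) :
    fs.foldl crfRank 3 =
      if fs.any crfAnn then 1 else if fs.any crfQ then 2 else 3 := by
  induction fs with
  | nil => rfl
  | cons h t ih =>
      rw [List.foldl_cons, crfRank_eq]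
      cases hA : crfAnn h
      · cases hQ : crfQ h
        · simp [hA, hQ, ih, List.any_cons]
        · simp [hA, hQ, crf_foldl_two, List.any_cons]
      · simp [hA, crf_foldl_one, List.any_cons]

lemma crf_anyAnn (fs : List String) :
    ((fs.filter (fun value => !(value == ""))).map
        (fun value => PySem.Str.lower (PySem.Str.strip value))).any
      (fun value => PySem.Str.isIn "annual" value || value == "a") = fs.any crfAnn := by
  unfold crfAnn
  simp [List.any_map, List.any_filter, Function.comp]

lemma crf_anyQ (fs : List String) :
    ((fs.filter (fun value => !(value == ""))).map
        (fun value => PySem.Str.lower (PySem.Str.strip value))).any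
      (fun value => PySem.Str.isIn "quarter" value || value == "q") = fs.any crfQ := by
  unfold crfQ
  simp [List.any_map, List.any_filter, Function.comp]

-- ===== VERDICT (by name: the statement is the Claim_ definition above) =====
theorem choose_relationship_frequency_spec : Claim_equal_choose_relationship_frequency := by
  intro fs _
  show choose_relationship_frequency fs = choose_relationship_frequency_alt fs
  unfold choose_relationship_frequency choose_relationship_frequency_alt
  rw [crf_foldl_three]
  simp only [crf_anyAnn, crf_anyQ]
  cases hA : fs.any crfAnn <;> cases hQ : fs.any crfQ <;> simp [crfTable]
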